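-- pv_equiv track=rewrite | github.com/Ashu-anand/Python | LeetCode/914_X_of_a_Kind_in_a_Deck_of_Cards.py | hasGroupsSizeX
-- ===== SOURCE A (Python) =====
-- from typing import List
-- import math
--
-- def hasGroupsSizeX(deck: List[int]) -> bool:
--     d={}
--     for i in deck:
--         if i in d:
--             d[i]+=1
--         else:
--             d[i]=1
--     n=0
--     if not d: return False
--     for k, v in sorted(d.items(), key=lambda item: item[1]):
--         if n==0:
--             if v==1:
--                 return False
--             else:
--                 n=v
--         else:
--             if v%n!=0:
--                 n=math.gcd(v, n)
--                 if n==1 or v%n!=0: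
--                     return False
--     return True
--
-- deck = [1,1,1,2,2,2,3,3]
-- ===== SOURCE B (Python) =====
-- from collections import Counter
--
-- def hasGroupsSizeX(deck):
--     if not deck:
--         return False
--     counts = list(Counter(deck).values())
--     m = min(counts)
--     for g in range(2, m + 1):
--         if all(c % g == 0 for c in counts):
--             return True
--     return False
-- ===== Notes on version B (the rewrite author's own statement) =====
-- stated objective: idiomatic
-- what changed: Replaces the sort-by-count and incremental math.gcd folding with a Counter plus trial division: try each candidate group size g from 2 to min(count) and succeed iff some g divides every count.
import Mathlib
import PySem

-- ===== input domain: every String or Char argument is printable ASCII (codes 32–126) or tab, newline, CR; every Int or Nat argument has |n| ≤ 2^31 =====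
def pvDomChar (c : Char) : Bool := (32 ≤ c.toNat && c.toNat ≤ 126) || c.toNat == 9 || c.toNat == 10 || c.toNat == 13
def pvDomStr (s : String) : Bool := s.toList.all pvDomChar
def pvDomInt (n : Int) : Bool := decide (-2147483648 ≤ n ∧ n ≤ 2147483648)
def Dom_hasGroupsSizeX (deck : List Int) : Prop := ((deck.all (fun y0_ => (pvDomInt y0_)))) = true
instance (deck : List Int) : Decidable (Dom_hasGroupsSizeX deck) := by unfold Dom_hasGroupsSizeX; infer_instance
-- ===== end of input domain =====

-- B replaces A's sort-by-count + incremental math.gcd fold with Counter + trial division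
-- over candidate group sizes (idiomatic alternative; return value only, no mutation).

-- ===== PORT A =====
-- the 'for k, v in sorted(d.items(), key=...)' loop with accumulator n and early returns
def hasGroupsSizeX_loop : List (Int × Int) → Int → Bool
  | [], _ => true
  | (_, v) :: rest, n =>
    if n = 0 then
      if v = 1 then false else hasGroupsSizeX_loop rest v
    else
      if PySem.Int.mod v n ≠ 0 then
        let n' : Int := (Int.gcd v n : Int)   -- math.gcd(v, n)
        if n' = 1 ∨ PySem.Int.mod v n' ≠ 0 then false
        else hasGroupsSizeX_loop rest n'
      else hasGroupsSizeX_loop rest n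

def hasGroupsSizeX (deck : List Int) : Bool :=
  let d := deck.foldl
    (fun d i => if d.contains i then d.insert i (d.getD i 0 + 1) else d.insert i 1)
    PySem.Dict.empty
  if d.items = [] then false
  else hasGroupsSizeX_loop (PySem.List.sorted d.items (fun item => item.2) false) 0

-- ===== PORT B =====
def hasGroupsSizeX_alt (deck : List Int) : Bool :=
  if deck = [] then false
  else
    let counts := (PySem.Dict.counter deck).values
    match PySem.List.min? counts (fun c => c) with
    | none => false  -- unreachable: deck ≠ [] so counts ≠ []
    | some m =>
      (PySem.List.pyRange 2 (m + 1) 1).any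
        (fun g => counts.all (fun c => PySem.Int.mod c g = 0))

-- ===== PRECONDITION & SPEC =====
def Spec_hasGroupsSizeX (deck : List Int) (out : Bool) : Prop := out = hasGroupsSizeX_alt deck
instance (deck : List Int) (out : Bool) : Decidable (Spec_hasGroupsSizeX deck out) := by unfold Spec_hasGroupsSizeX; infer_instance

-- ===== CLAIM (what is proved, stated in full; the proofs are below) =====
def Claim_equal_hasGroupsSizeX : Prop := ∀ (deck : List Int), Dom_hasGroupsSizeX deck → Spec_hasGroupsSizeX deck (hasGroupsSizeX deck)

-- ===== LEMMAS AND PROOFS =====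

-- gcd of a list of Ints, as a Nat (gcdL [] = 0)
def gcdL : List Int → Nat
  | [] => 0
  | v :: vs => Int.gcd v (gcdL vs)

theorem gcdL_dvd_mem (l : List Int) (x : Int) (hx : x ∈ l) : (↑(gcdL l) : Int) ∣ x := by
  induction l with
  | nil => cases hx
  | cons v vs ih =>
    simp only [gcdL]
    rcases List.mem_cons.mp hx with h | h
    · subst h; exact Int.gcd_dvd_left _ _
    · exact dvd_trans (Int.gcd_dvd_right _ _) (ih h)

theorem dvd_gcdL (l : List Int) (g : Int) (h : ∀ x ∈ l, g ∣ x) : g ∣ (↑(gcdL l) : Int) := by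
  induction l with
  | nil => simp [gcdL]
  | cons v vs ih =>
    simp only [gcdL]
    exact Int.dvd_coe_gcd (h v (List.mem_cons_self)) (ih (fun x hx => h x (List.mem_cons_of_mem _ hx)))

theorem gcdL_perm {l l' : List Int} (h : l.Perm l') : gcdL l = gcdL l' := by
  induction h with
  | nil => rfl
  | cons x _ ih => simp [gcdL, ih]
  | swap x y l =>
    show Int.gcd y (Int.gcd x (gcdL l)) = Int.gcd x (Int.gcd y (gcdL l))
    simp [Int.gcd, Nat.gcd_left_comm]
  | trans _ _ ih₁ ih₂ => exact ih₁.trans ih₂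

-- A's loop computes: the gcd of n with all remaining counts is ≥ 2
theorem loop_eq (vs : List (Int × Int)) (n : Int) (h2 : 2 ≤ n) :
    hasGroupsSizeX_loop vs n = decide (2 ≤ Int.gcd n (↑(gcdL (vs.map Prod.snd)) : Int)) := by
  induction vs generalizing n with
  | nil =>
    simp only [hasGroupsSizeX_loop, List.map_nil, gcdL, Nat.cast_zero, Int.gcd_zero_right]
    have h : 2 ≤ n.natAbs := by omega
    simp [h]
  | cons p rest ih =>
    obtain ⟨k, v⟩ := p
    have hn0 : ¬(n = 0) := by omega
    simp only [hasGroupsSizeX_loop, if_neg hn0, List.map_cons]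
    by_cases hmod : PySem.Int.mod v n = 0
    · have hdvd : n ∣ v := (PySem.Int.mod_eq_zero_iff_dvd v n).mp hmod
      rw [if_neg (by simp [hmod])]
      rw [ih n h2]
      have hg : Int.gcd n (↑(gcdL (v :: rest.map Prod.snd)) : Int)
          = Int.gcd n (↑(gcdL (rest.map Prod.snd)) : Int) := by
        show Int.gcd n (↑(Int.gcd v (↑(gcdL (rest.map Prod.snd)) : Int)) : Int) = _
        simp only [Int.gcd, Int.natAbs_natCast]
        rw [← Nat.gcd_assoc, Nat.gcd_eq_left (Int.natAbs_dvd_natAbs.mpr hdvd)]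
      simp only [hg]
    · rw [if_pos (by simpa using hmod)]
      have hVN0 : Int.gcd v n ≠ 0 := by
        intro h0
        exact hn0 ((Int.gcd_eq_zero_iff.mp h0).2)
      have hmodg : PySem.Int.mod v (↑(Int.gcd v n) : Int) = 0 :=
        (PySem.Int.mod_eq_zero_iff_dvd _ _).mpr (Int.gcd_dvd_left v n)
      by_cases hg1 : Int.gcd v n = 1
      · rw [if_pos (Or.inl (by simp [hg1]))]
        have hle : Int.gcd n (↑(gcdL (v :: rest.map Prod.snd)) : Int) ≤ 1 := by
          show Int.gcd n (↑(Int.gcd v (↑(gcdL (rest.map Prod.snd)) : Int)) : Int) ≤ 1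
          simp only [Int.gcd, Int.natAbs_natCast]
          have hd : (n.natAbs.gcd (v.natAbs.gcd (gcdL (rest.map Prod.snd)))) ∣
              v.natAbs.gcd n.natAbs :=
            Nat.dvd_gcd (dvd_trans (Nat.gcd_dvd_right _ _) (Nat.gcd_dvd_left _ _))
              (Nat.gcd_dvd_left _ _)
          have h1 : v.natAbs.gcd n.natAbs = 1 := hg1
          rw [h1] at hd
          exact Nat.le_of_dvd one_pos hd
        symm
        simp only [decide_eq_false_iff_not]
        omega
      · rw [if_neg (by simp [hg1, hmodg])]
        have h2' : (2 : Int) ≤ (↑(Int.gcd v n) : Int) := by omega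
        rw [ih _ h2']
        have hg : Int.gcd (↑(Int.gcd v n) : Int) (↑(gcdL (rest.map Prod.snd)) : Int)
            = Int.gcd n (↑(gcdL (v :: rest.map Prod.snd)) : Int) := by
          show _ = Int.gcd n (↑(Int.gcd v (↑(gcdL (rest.map Prod.snd)) : Int)) : Int)
          simp only [Int.gcd, Int.natAbs_natCast]
          rw [Nat.gcd_assoc, Nat.gcd_left_comm]
        simp only [hg]
        rfl

-- A's count dict is collections.Counter(deck)
theorem dict_eq_counter (deck : List Int) :
    deck.foldl
      (fun d i => if d.contains i then d.insert i (d.getD i 0 + 1) else d.insert i 1)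
      PySem.Dict.empty = PySem.Dict.counter deck := by
  rw [PySem.List.foldl_congr_mem deck _ (fun d i => d.insert i (d.getD i 0 + 1))
      PySem.Dict.empty ?_]
  · exact PySem.Dict.foldl_insert_getD_add_one_eq_counter deck
  · intro d i _
    by_cases hc : d.contains i
    · simp [hc]
    · rw [if_neg hc]
      show d.insert i 1 = d.insert i (d.getD i 0 + 1)
      rw [PySem.Dict.getD_of_not_contains d 0 (by simpa using hc)]
      norm_num

-- every value of Counter(deck) is a positive count
theorem counter_values_pos (deck : List Int) :
    ∀ x ∈ (PySem.Dict.counter deck).values, 1 ≤ x := by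
  intro x hx
  simp only [PySem.Dict.values, PySem.Dict.items_counter, List.map_map, List.mem_map] at hx
  obtain ⟨kk, hk, hkx⟩ := hx
  have hmem : kk ∈ deck := (PySem.Set.mem_ofList deck kk).mp hk
  have : 1 ≤ deck.count kk := List.count_pos_iff.mpr hmem
  simp only [Function.comp] at hkx
  omega

theorem counter_values_ne_nil (deck : List Int) (hne : deck ≠ []) :
    (PySem.Dict.counter deck).values ≠ [] := by
  obtain ⟨x, xs, rfl⟩ := List.exists_cons_of_ne_nil hne
  simp [PySem.Dict.values, PySem.Dict.items_counter]
  intro h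
  have : x ∈ PySem.Set.ofList (x :: xs) := (PySem.Set.mem_ofList _ x).mpr List.mem_cons_self
  rw [h] at this
  cases this

-- A equals the gcd criterion on the Counter's values
theorem portA_eq (deck : List Int) (hne : deck ≠ []) :
    hasGroupsSizeX deck = decide (2 ≤ gcdL ((PySem.Dict.counter deck).values)) := by
  have hvals : (PySem.Dict.counter deck).values = (PySem.Dict.counter deck).items.map Prod.snd := rfl
  have hitems : (PySem.Dict.counter deck).items ≠ [] := by
    intro h
    exact counter_values_ne_nil deck hne (by rw [hvals, h]; rfl)
  simp only [hasGroupsSizeX, dict_eq_counter, if_neg hitems]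
  set items := (PySem.Dict.counter deck).items with hitemsdef
  have hperm : ((PySem.List.sorted items (fun item => item.2) false).map Prod.snd).Perm
      (items.map Prod.snd) := (PySem.List.sorted_perm items (fun item => item.2) false).map Prod.snd
  have hgcd : gcdL ((PySem.List.sorted items (fun item => item.2) false).map Prod.snd)
      = gcdL ((PySem.Dict.counter deck).values) := by rw [hvals]; exact gcdL_perm hperm
  have hsne : PySem.List.sorted items (fun item => item.2) false ≠ [] := by
    simpa [PySem.List.sorted_eq_nil_iff] using hitems
  obtain ⟨q, qs, hq⟩ := List.exists_cons_of_ne_nil hsne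
  have hqmem : q.2 ∈ (PySem.Dict.counter deck).values := by
    rw [hvals]
    exact List.mem_map_of_mem ((PySem.List.mem_sorted items (fun item => item.2) false q).mp
      (hq ▸ List.mem_cons_self))
  have hqpos : 1 ≤ q.2 := counter_values_pos deck q.2 hqmem
  rw [hq]
  obtain ⟨kq, vq⟩ := q
  have hstep : hasGroupsSizeX_loop ((kq, vq) :: qs) 0
      = if vq = 1 then false else hasGroupsSizeX_loop qs vq := rfl
  by_cases hv1 : vq = 1
  · rw [hstep, if_pos hv1]
    have hdl : (↑(gcdL ((PySem.Dict.counter deck).values)) : Int) ∣ vq :=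
      gcdL_dvd_mem _ _ hqmem
    rw [hv1] at hdl
    have : gcdL ((PySem.Dict.counter deck).values) ≤ 1 := by
      have := Int.le_of_dvd (by omega) hdl
      omega
    symm
    simp only [decide_eq_false_iff_not]
    omega
  · have h2 : (2 : Int) ≤ vq := by omega
    rw [hstep, if_neg hv1, loop_eq qs vq h2]
    have hfin : Int.gcd vq (↑(gcdL (qs.map Prod.snd)) : Int)
        = gcdL ((PySem.Dict.counter deck).values) := by
      rw [← hgcd, hq]
      rfl
    simp only [hfin]

-- B equals the gcd criterion on the Counter's values
theorem portB_eq (deck : List Int) (hne : deck ≠ []) :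
    hasGroupsSizeX_alt deck = decide (2 ≤ gcdL ((PySem.Dict.counter deck).values)) := by
  simp only [hasGroupsSizeX_alt, if_neg hne]
  set counts := (PySem.Dict.counter deck).values with hcounts
  have hcne : counts ≠ [] := counter_values_ne_nil deck hne
  obtain ⟨m, hm⟩ : ∃ m, PySem.List.min? counts (fun c => c) = some m := by
    cases h : PySem.List.min? counts (fun c => c) with
    | none => exact absurd ((PySem.List.min?_eq_none_iff counts _).mp h) hcne
    | some m => exact ⟨m, rfl⟩
  rw [hm]
  have hmmem : m ∈ counts := PySem.List.min?_mem hm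
  have hm1 : 1 ≤ m := counter_values_pos deck m hmmem
  apply Bool.coe_iff_coe.mp
  simp only [List.any_eq_true, List.all_eq_true, decide_eq_true_eq]
  constructor
  · rintro ⟨g, hgmem, hgall⟩
    obtain ⟨hg2, _⟩ := PySem.List.mem_pyRange_one.mp hgmem
    have hdvd : g ∣ (↑(gcdL counts) : Int) :=
      dvd_gcdL counts g (fun x hx => (PySem.Int.mod_eq_zero_iff_dvd x g).mp (hgall x hx))
    have hG0 : gcdL counts ≠ 0 := by
      intro h0
      have hd := gcdL_dvd_mem counts m hmmem
      rw [h0] at hd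
      simp at hd
      omega
    have := Int.le_of_dvd (by omega) hdvd
    omega
  · intro hG2
    refine ⟨(↑(gcdL counts) : Int), ?_, ?_⟩
    · apply PySem.List.mem_pyRange_one.mpr
      have hdm : (↑(gcdL counts) : Int) ∣ m := gcdL_dvd_mem counts m hmmem
      have := Int.le_of_dvd (by omega) hdm
      omega
    · intro c hc
      exact (PySem.Int.mod_eq_zero_iff_dvd c _).mpr (gcdL_dvd_mem counts c hc)

-- ===== VERDICT (by name: the statement is the Claim_ definition above) =====
theorem hasGroupsSizeX_spec : Claim_equal_hasGroupsSizeX := by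
  intro deck _
  show hasGroupsSizeX deck = hasGroupsSizeX_alt deck
  by_cases hne : deck = []
  · subst hne; rfl
  · rw [portA_eq deck hne, portB_eq deck hne]
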